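-- pv_equiv track=rewrite | github.com/code-by-rohith/hacker-rank | Type_2/Matrix/Row_Col_AllNum.py | is_valid_matrix
-- ===== SOURCE A (Python) =====
-- def is_valid_matrix(matrix):
--     n = len(matrix)
--     if n == 0:
--         return False
--     for row in matrix:
--         if sorted(row) != list(range(1, n+1)):
--             return False
--
--     for col in range(n):
--         column = [matrix[row][col] for row in range(n)]
--         if sorted(column) != list(range(1, n + 1)):
--             return False
--     return True
--
-- matrix = [
--     [1,2, 3],
--     [3, 1, 2],
--     [2, 3, 1]
-- ]
-- ===== SOURCE B (Python) =====
-- def is_valid_matrix(matrix):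
--     # Single early-exit pass: per-cell membership checks against incrementally
--     # built row/column "seen" tables; no sorting, no second column pass.
--     n = len(matrix)
--     if n == 0:
--         return False
--     target = set(range(1, n + 1))
--     col_seen = [set() for _ in range(n)]
--     for row in matrix:
--         if len(row) != n:
--             return False
--         row_seen = set()
--         for j, v in enumerate(row):
--             if v not in target or v in row_seen or v in col_seen[j]:
--                 return False
--             row_seen.add(v)
--             col_seen[j].add(v)
--     return True
-- ===== Notes on version B (the rewrite author's own statement) =====
-- stated objective: alternative
-- what changed: A makes two staged passes (sort every row and compare to list(range(1,n+1)), then re-extract every column by nested indexing, sort it and compare again); B makes a single early-exit pass over the rows, checking each cell once against the target set and incrementally built per-row and per-column seen-sets, so no sorting and no second column pass.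
import Mathlib
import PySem

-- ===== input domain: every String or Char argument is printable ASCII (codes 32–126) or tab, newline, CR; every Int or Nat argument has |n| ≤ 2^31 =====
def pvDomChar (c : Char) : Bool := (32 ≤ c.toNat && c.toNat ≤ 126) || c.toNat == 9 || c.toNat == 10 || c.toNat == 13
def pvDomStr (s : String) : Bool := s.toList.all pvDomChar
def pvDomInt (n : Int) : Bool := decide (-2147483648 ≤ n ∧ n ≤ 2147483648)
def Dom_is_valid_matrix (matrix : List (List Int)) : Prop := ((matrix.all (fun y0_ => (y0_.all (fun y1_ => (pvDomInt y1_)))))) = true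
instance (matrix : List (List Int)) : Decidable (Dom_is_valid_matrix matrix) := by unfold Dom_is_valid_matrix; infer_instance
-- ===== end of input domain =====

-- B replaces A's two staged sort-and-compare passes (rows, then an index-based column
-- re-scan) by ONE early-exit pass over the rows with incrementally built per-row and
-- per-column "seen" sets and per-cell membership checks; objective: alternative.

-- ===== PORT A =====
-- The column comprehension indexes matrix[row][col]; it is only reached after every row
-- passed the sorted check (hence has length n), so the pyGetD defaults are never used
-- and the port is exact.
def is_valid_matrix (matrix : List (List Int)) : Bool :=
  let n := matrix.length
  if n = 0 then false
  else
    (matrix.all (fun row =>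
        PySem.List.sorted row (fun x => x) == PySem.List.pyRange 1 ((n : Int) + 1))) &&
    ((PySem.List.pyRange 0 (n : Int)).all (fun col =>
        let column := (PySem.List.pyRange 0 (n : Int)).map (fun r =>
          PySem.List.pyGetD (PySem.List.pyGetD matrix r []) col 0)
        PySem.List.sorted column (fun x => x) == PySem.List.pyRange 1 ((n : Int) + 1)))

-- ===== PORT B =====
-- Inner loop 'for j, v in enumerate(row)': since len(row) = len(col_seen) = n, walking
-- col_seen structurally in lockstep with the row IS indexing col_seen[j]; the rebuilt
-- list (head updated, recursive tail) is the Python in-place col_seen[j].add(v).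
def bCells (target : PySem.Set Int) :
    PySem.Set Int → List Int → List (PySem.Set Int) → Option (List (PySem.Set Int))
  | _, [], cols => some cols
  | rowSeen, v :: rest, cols =>
    let c := cols.headD PySem.Set.empty
    if !(PySem.Set.contains target v) || PySem.Set.contains rowSeen v
        || PySem.Set.contains c v then none
    else
      match bCells target (PySem.Set.add rowSeen v) rest cols.tail with
      | none => none
      | some cols' => some (PySem.Set.add c v :: cols')

-- outer loop 'for row in matrix', threading col_seen; none = an early 'return False'
def bRows (target : PySem.Set Int) (n : Nat) :
    List (PySem.Set Int) → List (List Int) → Option (List (PySem.Set Int))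
  | cols, [] => some cols
  | cols, row :: rest =>
    if row.length ≠ n then none
    else
      match bCells target PySem.Set.empty row cols with
      | none => none
      | some cols' => bRows target n cols' rest

def is_valid_matrix_alt (matrix : List (List Int)) : Bool :=
  let n := matrix.length
  if n = 0 then false
  else
    let target : PySem.Set Int := PySem.Set.ofList (PySem.List.pyRange 1 ((n : Int) + 1))
    match bRows target n (List.replicate n PySem.Set.empty) matrix with
    | none => false
    | some _ => true

-- ===== PRECONDITION & SPEC =====
def Spec_is_valid_matrix (matrix : List (List Int)) (out : Bool) : Prop := out = is_valid_matrix_alt matrix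
instance (matrix : List (List Int)) (out : Bool) : Decidable (Spec_is_valid_matrix matrix out) := by unfold Spec_is_valid_matrix; infer_instance

-- ===== CLAIM (what is proved, stated in full; the proofs are below) =====
def Claim_equal_is_valid_matrix : Prop := ∀ (matrix : List (List Int)), Dom_is_valid_matrix matrix → Spec_is_valid_matrix matrix (is_valid_matrix matrix)

-- ===== LEMMAS AND PROOFS =====

-- range(1, n+1) has length n
theorem lenR (n : Nat) : (PySem.List.pyRange 1 ((n : Int) + 1)).length = n := by
  rw [PySem.List.length_pyRange_one]; omega

-- range(1, n+1) is strictly increasing, hence Nodup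
theorem nodupR (n : Nat) : (PySem.List.pyRange 1 ((n : Int) + 1)).Nodup :=
  (PySem.List.pairwise_lt_pyRange_one 1 ((n : Int) + 1)).imp (fun h => ne_of_lt h)

-- the "permutation of 1..n" predicate both programs decide, in membership form
def permRange (n : Nat) (l : List Int) : Prop :=
  l.length = n ∧ l.Nodup ∧ ∀ v ∈ l, v ∈ PySem.List.pyRange 1 ((n : Int) + 1)

-- A's per-list test 'sorted(l) == list(range(1, n+1))' decides exactly permRange
theorem sorted_eq_iff_permRange (l : List Int) (n : Nat) :
    (PySem.List.sorted l (fun x => x) = PySem.List.pyRange 1 ((n : Int) + 1)) ↔ permRange n l := by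
  constructor
  · intro h
    have hp : (PySem.List.pyRange 1 ((n : Int) + 1)).Perm l := by
      rw [← h]; exact PySem.List.sorted_perm l (fun x => x) false
    exact ⟨by rw [← hp.length_eq, lenR], hp.nodup_iff.mp (nodupR n), fun v hv => hp.mem_iff.mpr hv⟩
  · rintro ⟨hl, hnd, hmem⟩
    have hsub : l ⊆ PySem.List.pyRange 1 ((n : Int) + 1) := fun v hv => hmem v hv
    have hlen : (PySem.List.pyRange 1 ((n : Int) + 1)).length ≤ l.length := by rw [lenR, hl]
    have hp : (PySem.List.pyRange 1 ((n : Int) + 1)).Perm l :=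
      ((hnd.subperm hsub).perm_of_length_le hlen).symm
    exact PySem.List.sorted_eq_of_perm_of_pairwise_lt l _ (fun x => x) hp
      (PySem.List.pairwise_lt_pyRange_one 1 ((n : Int) + 1))

-- A's extracted column c equals the direct column map
theorem columnA_eq (matrix : List (List Int)) (c : Int) :
    (PySem.List.pyRange 0 ((matrix.length : Int))).map (fun r =>
      PySem.List.pyGetD (PySem.List.pyGetD matrix r []) c 0)
    = matrix.map (fun row => PySem.List.pyGetD row c 0) := by
  have h1 : (PySem.List.pyRange 0 ((matrix.length : Int))).map (fun r => PySem.List.pyGetD matrix r []) = matrix := by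
    have := PySem.List.map_pyGetD_pyRange_zero matrix []
    simpa [PySem.List.len] using this
  have h2 := List.map_map (g := fun row => PySem.List.pyGetD row c 0)
    (f := fun r => PySem.List.pyGetD matrix r []) (l := PySem.List.pyRange 0 ((matrix.length : Int)))
  rw [h1] at h2
  exact h2.symm

-- Set-membership bridges specialised to Int (proved by the pysem simp set)
theorem contains_add_false_iff (s : PySem.Set Int) (x y : Int) :
    (PySem.Set.add s x).contains y = false ↔ (y ≠ x ∧ s.contains y = false) := by
  simp [pysem]; tauto

theorem contains_empty (x : Int) : (PySem.Set.empty : PySem.Set Int).contains x = false := rfl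

theorem getD_replicate_empty (n j : Nat) :
    (List.replicate n PySem.Set.empty).getD j (PySem.Set.empty : PySem.Set Int) = PySem.Set.empty := by
  simp [List.getD_eq_getElem?_getD, List.getElem?_replicate]; split <;> rfl

-- what bCells computes on success: every column set gets the row's entry added
def zipAdd : List Int → List (PySem.Set Int) → List (PySem.Set Int)
  | [], cols => cols
  | v :: rest, cols => PySem.Set.add (cols.headD PySem.Set.empty) v :: zipAdd rest cols.tail

theorem length_zipAdd : ∀ (row : List Int) (cols : List (PySem.Set Int)),
    row.length ≤ cols.length → (zipAdd row cols).length = cols.length := by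
  intro row
  induction row with
  | nil => intro cols _; rfl
  | cons v rest ih =>
    intro cols h
    cases cols with
    | nil => simp at h
    | cons c cs => simpa [zipAdd] using ih cs (by simpa using h)


theorem getD_zipAdd : ∀ (row : List Int) (cols : List (PySem.Set Int)) (j : Nat),
    row.length ≤ cols.length →
    (zipAdd row cols).getD j PySem.Set.empty =
      if j < row.length then PySem.Set.add (cols.getD j PySem.Set.empty) (row.getD j 0)
      else cols.getD j PySem.Set.empty := by
  intro row
  induction row with
  | nil => intro cols j _; simp [zipAdd]
  | cons v rest ih =>
    intro cols j h
    cases cols with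
    | nil => simp at h
    | cons c cs =>
      cases j with
      | zero => simp [zipAdd]
      | succ k => simpa [zipAdd, Nat.succ_lt_succ_iff] using ih cs k (by simpa using h)

-- success/characterisation of the inner cell loop
theorem bCells_char (target : PySem.Set Int) :
    ∀ (row : List Int) (rowSeen : PySem.Set Int) (cols : List (PySem.Set Int)),
    bCells target rowSeen row cols =
      if (∀ v ∈ row, target.contains v = true) ∧
         row.Nodup ∧ (∀ v ∈ row, rowSeen.contains v = false) ∧
         (∀ j < row.length, (cols.getD j PySem.Set.empty).contains (row.getD j 0) = false)
      then some (zipAdd row cols) else none := by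
  intro row
  induction row with
  | nil => intro rowSeen cols; simp [bCells, zipAdd]
  | cons v rest ih =>
    intro rowSeen cols
    rw [bCells]
    by_cases hbad : (!(PySem.Set.contains target v) || PySem.Set.contains rowSeen v
        || PySem.Set.contains (cols.headD PySem.Set.empty) v) = true
    · rw [if_pos hbad]
      simp only [Bool.or_eq_true, Bool.not_eq_true'] at hbad
      rw [if_neg]
      rintro ⟨htar, hnd, hrs, hcol⟩
      rcases hbad with (h | h) | h
      · have := htar v (by simp); rw [h] at this; exact Bool.false_ne_true this
      · have := hrs v (by simp); rw [h] at this; simp at this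
      · have := hcol 0 (by simp)
        simp only [List.getD_cons_zero] at this
        have hh : cols.getD 0 PySem.Set.empty = cols.headD PySem.Set.empty := by
          cases cols <;> rfl
        rw [hh, h] at this
        simp at this
    · rw [if_neg hbad]
      simp only [Bool.or_eq_true, Bool.not_eq_true', not_or, Bool.not_eq_false,
        Bool.not_eq_true] at hbad
      obtain ⟨⟨htv, hrv⟩, hcv⟩ := hbad
      rw [ih (PySem.Set.add rowSeen v) cols.tail]
      by_cases hc : (∀ w ∈ rest, target.contains w = true) ∧
          rest.Nodup ∧ (∀ w ∈ rest, (PySem.Set.add rowSeen v).contains w = false) ∧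
          (∀ j < rest.length, (cols.tail.getD j PySem.Set.empty).contains (rest.getD j 0) = false)
      · rw [if_pos hc]
        obtain ⟨htar, hnd, hrs, hcol⟩ := hc
        have hvrest : v ∉ rest := fun hv =>
          ((contains_add_false_iff _ _ _).mp (hrs v hv)).1 rfl
        rw [if_pos]
        · rfl
        · refine ⟨?_, ?_, ?_, ?_⟩
          · intro w hw; rcases List.mem_cons.mp hw with rfl | hw
            · exact htv
            · exact htar w hw
          · exact List.nodup_cons.mpr ⟨hvrest, hnd⟩
          · intro w hw; rcases List.mem_cons.mp hw with rfl | hw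
            · exact hrv
            · exact ((contains_add_false_iff _ _ _).mp (hrs w hw)).2
          · intro j hj
            cases j with
            | zero =>
              have hh : cols.getD 0 PySem.Set.empty = cols.headD PySem.Set.empty := by
                cases cols <;> rfl
              rw [List.getD_cons_zero, hh]
              exact hcv
            | succ k =>
              have := hcol k (by simpa [Nat.succ_lt_succ_iff] using hj)
              have hh : cols.tail.getD k PySem.Set.empty = cols.getD (k+1) PySem.Set.empty := by
                cases cols <;> rfl
              rw [hh] at this
              simpa using this
      · rw [if_neg hc, if_neg]
        rintro ⟨htar, hnd, hrs, hcol⟩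
        apply hc
        refine ⟨fun w hw => htar w (by simp [hw]), (List.nodup_cons.mp hnd).2, ?_, ?_⟩
        · intro w hw
          have h1 := hrs w (by simp [hw])
          have h2 : w ≠ v := fun h => (List.nodup_cons.mp hnd).1 (h ▸ hw)
          exact (contains_add_false_iff _ _ _).mpr ⟨h2, h1⟩
        · intro j hj
          have := hcol (j+1) (by simpa [Nat.succ_lt_succ_iff] using hj)
          have hh : cols.getD (j+1) PySem.Set.empty = cols.tail.getD j PySem.Set.empty := by
            cases cols <;> rfl
          rw [hh] at this
          simpa using this

-- success characterisation of the outer row loop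
theorem bRows_isSome_iff (target : PySem.Set Int) (n : Nat) :
    ∀ (rows : List (List Int)) (cols : List (PySem.Set Int)), cols.length = n →
    ((bRows target n cols rows).isSome = true ↔
      (∀ r ∈ rows, r.length = n ∧ r.Nodup ∧ ∀ v ∈ r, target.contains v = true) ∧
      (∀ j < n, (rows.map (fun r => r.getD j 0)).Nodup ∧
        ∀ v ∈ rows.map (fun r => r.getD j 0),
          (cols.getD j PySem.Set.empty).contains v = false)) := by
  intro rows
  induction rows with
  | nil =>
    intro cols _
    simp [bRows]
  | cons row rest ih =>
    intro cols hcols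
    rw [bRows]
    by_cases hlen : row.length = n
    · rw [if_neg (by simpa using hlen)]
      rw [bCells_char]
      by_cases hc : (∀ v ∈ row, target.contains v = true) ∧
          row.Nodup ∧ (∀ v ∈ row, (PySem.Set.empty : PySem.Set Int).contains v = false) ∧
          (∀ j < row.length, (cols.getD j PySem.Set.empty).contains (row.getD j 0) = false)
      · rw [if_pos hc]
        obtain ⟨htar, hnd, _, hcol⟩ := hc
        have hlz : (zipAdd row cols).length = n := by
          rw [length_zipAdd row cols (by omega)]; exact hcols
        rw [ih (zipAdd row cols) hlz]
        constructor
        · rintro ⟨hrest, hcols'⟩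
          refine ⟨?_, ?_⟩
          · intro r hr; rcases List.mem_cons.mp hr with rfl | hr
            · exact ⟨hlen, hnd, htar⟩
            · exact hrest r hr
          · intro j hj
            obtain ⟨hcnd, hcmem⟩ := hcols' j hj
            have hAdd : ∀ v ∈ rest.map (fun r => r.getD j 0),
                v ≠ row.getD j 0 ∧ (cols.getD j PySem.Set.empty).contains v = false := by
              intro v hv
              have := hcmem v hv
              rw [getD_zipAdd row cols j (by omega), if_pos (by omega)] at this
              exact (contains_add_false_iff _ _ _).mp this
            refine ⟨?_, ?_⟩
            · simp only [List.map_cons]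
              exact List.nodup_cons.mpr
                ⟨fun hmem => (hAdd _ hmem).1 rfl, hcnd⟩
            · intro v hv
              simp only [List.map_cons, List.mem_cons] at hv
              rcases hv with rfl | hv
              · exact hcol j (by omega)
              · exact (hAdd v hv).2
        · rintro ⟨hall, hcols'⟩
          refine ⟨fun r hr => hall r (by simp [hr]), ?_⟩
          intro j hj
          obtain ⟨hcnd, hcmem⟩ := hcols' j hj
          simp only [List.map_cons, List.nodup_cons] at hcnd
          refine ⟨hcnd.2, ?_⟩
          intro v hv
          rw [getD_zipAdd row cols j (by omega), if_pos (by omega)]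
          have h1 : v ≠ row.getD j 0 := by
            intro h
            apply hcnd.1
            simp only [List.mem_map] at hv ⊢
            obtain ⟨r, hr, hrv⟩ := hv
            exact ⟨r, hr, by rw [hrv, h]⟩
          have h2 := hcmem v (by simp only [List.map_cons, List.mem_cons]; right; exact hv)
          exact (contains_add_false_iff _ _ _).mpr ⟨h1, h2⟩
      · rw [if_neg hc]
        simp only [Option.isSome_none, Bool.false_eq_true, false_iff]
        rintro ⟨hall, hcols'⟩
        apply hc
        obtain ⟨_, hnd, htar⟩ := hall row (by simp)
        refine ⟨htar, hnd, fun v _ => contains_empty v, ?_⟩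
        intro j hj
        exact (hcols' j (by omega)).2 (row.getD j 0) (by simp)
    · rw [if_pos (by simpa using hlen)]
      simp only [Option.isSome_none, Bool.false_eq_true, false_iff]
      rintro ⟨hall, _⟩
      exact hlen (hall row (by simp)).1

-- ===== VERDICT (by name: the statement is the Claim_ definition above) =====
theorem is_valid_matrix_spec : Claim_equal_is_valid_matrix := by
  intro matrix _
  unfold Spec_is_valid_matrix is_valid_matrix is_valid_matrix_alt
  simp only []
  by_cases h0 : matrix.length = 0
  · simp [h0]
  · rw [if_neg h0, if_neg h0]
    set n := matrix.length with hn
    set target : PySem.Set Int := PySem.Set.ofList (PySem.List.pyRange 1 ((n : Int) + 1)) with htar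
    -- B's value, via the loop characterisation
    have hB := bRows_isSome_iff target n matrix (List.replicate n PySem.Set.empty) (by simp)
    have htmem : ∀ v : Int, target.contains v = true ↔ v ∈ PySem.List.pyRange 1 ((n : Int) + 1) := by
      intro v; rw [htar]; simp [pysem]
    -- reduce both sides to the same proposition
    rw [Bool.eq_iff_iff]
    constructor
    · -- A = true → B = true
      intro hA
      rw [Bool.and_eq_true] at hA
      obtain ⟨hrows, hcols⟩ := hA
      simp only [List.all_eq_true, beq_iff_eq] at hrows hcols
      have hrowsP : ∀ r ∈ matrix, permRange n r := fun r hr =>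
        (sorted_eq_iff_permRange r n).mp (hrows r hr)
      have hgoal : (bRows target n (List.replicate n PySem.Set.empty) matrix).isSome = true := by
        rw [hB]
        constructor
        · intro r hr
          obtain ⟨h1, h2, h3⟩ := hrowsP r hr
          exact ⟨h1, h2, fun v hv => (htmem v).mpr (h3 v hv)⟩
        · intro j hj
          have hcj := hcols (j : Int) (by
            rw [PySem.List.mem_pyRange_one]; omega)
          rw [columnA_eq] at hcj
          have hmapeq : matrix.map (fun row => PySem.List.pyGetD row (j : Int) 0)
              = matrix.map (fun r => r.getD j 0) := by
            apply List.map_congr_left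
            intro r _
            exact PySem.List.pyGetD_natCast r j 0
          rw [hmapeq] at hcj
          obtain ⟨_, hcnd, _⟩ := (sorted_eq_iff_permRange _ n).mp hcj
          exact ⟨hcnd, fun v _ => by rw [getD_replicate_empty]; exact contains_empty v⟩
      cases hbr : bRows target n (List.replicate n PySem.Set.empty) matrix with
      | none => rw [hbr] at hgoal; simp at hgoal
      | some c => rfl
    · -- B = true → A = true
      intro hBtrue
      have hsome : (bRows target n (List.replicate n PySem.Set.empty) matrix).isSome = true := by
        cases hbr : bRows target n (List.replicate n PySem.Set.empty) matrix with
        | none => rw [hbr] at hBtrue; simp at hBtrue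
        | some c => simp
      rw [hB] at hsome
      obtain ⟨hall, hcols'⟩ := hsome
      have hrowsP : ∀ r ∈ matrix, permRange n r := by
        intro r hr
        obtain ⟨h1, h2, h3⟩ := hall r hr
        exact ⟨h1, h2, fun v hv => (htmem v).mp (h3 v hv)⟩
      rw [Bool.and_eq_true]
      constructor
      · simp only [List.all_eq_true, beq_iff_eq]
        exact fun r hr => (sorted_eq_iff_permRange r n).mpr (hrowsP r hr)
      · simp only [List.all_eq_true, beq_iff_eq]
        intro c hc
        rw [PySem.List.mem_pyRange_one] at hc
        obtain ⟨j, rfl⟩ : ∃ j : Nat, (j : Int) = c := ⟨c.toNat, by omega⟩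
        have hj : j < n := by omega
        rw [columnA_eq]
        have hmapeq : matrix.map (fun row => PySem.List.pyGetD row (j : Int) 0)
            = matrix.map (fun r => r.getD j 0) := by
          apply List.map_congr_left
          intro r _
          exact PySem.List.pyGetD_natCast r j 0
        rw [hmapeq]
        apply (sorted_eq_iff_permRange _ n).mpr
        refine ⟨by simp [hn], (hcols' j hj).1, ?_⟩
        intro v hv
        simp only [List.mem_map] at hv
        obtain ⟨r, hr, rfl⟩ := hv
        obtain ⟨h1, _, h3⟩ := hrowsP r hr
        have hjr : j < r.length := by omega
        rw [List.getD_eq_getElem r 0 hjr]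
        exact h3 _ (List.getElem_mem hjr)
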